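-- pv_equiv track=rewrite | github.com/FrostPrice/computer-graphics | m3/procedural_gen_graph_with_pathfinding.py | _get_connected_directions
-- ===== SOURCE A (Python) =====
-- from typing import Dict, List, Set, Tuple, Optional
--
-- def _get_connected_directions(x: int, y: int,
--                              room_list: List[Tuple[int, int]]) -> Set[str]:
--     """Get the directions in which a room has connections."""
--     connections = set()
--     neighbors = {
--         "E": (x + 1, y),
--         "W": (x - 1, y),
--         "N": (x, y + 1),
--         "S": (x, y - 1),
--     }
--
--     for dir_name, (nx_, ny_) in neighbors.items():
--         if (nx_, ny_) in room_list:
--             connections.add(dir_name)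
--
--     return connections
-- ===== SOURCE B (Python) =====
-- from typing import List, Set, Tuple
--
-- def _get_connected_directions(x: int, y: int,
--                               room_list: List[Tuple[int, int]]) -> Set[str]:
--     """One pass over room_list: classify each room's offset from (x, y)."""
--     e = w = n = s = False
--     for rx, ry in room_list:
--         dx, dy = rx - x, ry - y
--         if dx == 1 and dy == 0:
--             e = True
--         elif dx == -1 and dy == 0:
--             w = True
--         elif dx == 0 and dy == 1:
--             n = True
--         elif dx == 0 and dy == -1:
--             s = True
--     return {d for d, f in (("E", e), ("W", w), ("N", n), ("S", s)) if f}
-- ===== Notes on version B (the rewrite author's own statement) =====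
-- stated objective: alternative
-- what changed: B scans room_list once, classifying each room by its offset from (x,y) into four flags, instead of A's four separate membership probes of candidate neighbor points against the list.
import Mathlib
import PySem

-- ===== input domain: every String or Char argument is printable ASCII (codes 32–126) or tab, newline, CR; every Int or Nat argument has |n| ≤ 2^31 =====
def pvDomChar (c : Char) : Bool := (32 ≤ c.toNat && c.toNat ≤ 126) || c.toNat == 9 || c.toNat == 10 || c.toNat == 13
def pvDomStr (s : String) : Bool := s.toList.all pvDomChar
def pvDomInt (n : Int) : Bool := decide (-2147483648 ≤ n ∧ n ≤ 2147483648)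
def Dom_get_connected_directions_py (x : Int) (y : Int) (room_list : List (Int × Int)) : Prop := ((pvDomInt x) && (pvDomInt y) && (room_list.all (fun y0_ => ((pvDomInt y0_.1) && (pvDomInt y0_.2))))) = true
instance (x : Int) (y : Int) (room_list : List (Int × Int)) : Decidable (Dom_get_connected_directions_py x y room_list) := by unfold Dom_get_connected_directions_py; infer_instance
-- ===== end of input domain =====

-- B replaces A's four membership probes of candidate neighbor points by a single
-- scan of room_list that classifies each room's offset from (x, y) (alternative decomposition).


-- ===== PORT A =====
-- A: build the dict of 4 candidate neighbors, then for each direction test membership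
-- of the candidate point in room_list, adding hits to a set.
def get_connected_directions_py (x : Int) (y : Int) (room_list : List (Int × Int)) : List String :=
  let neighbors : List (String × (Int × Int)) :=
    [("E", (x + 1, y)), ("W", (x - 1, y)), ("N", (x, y + 1)), ("S", (x, y - 1))]
  neighbors.foldl
    (fun connections dp =>
      if room_list.contains dp.2 then PySem.Set.add connections dp.1 else connections)
    PySem.Set.empty

-- ===== PORT B =====
-- B: one pass over room_list, classifying each room's offset (dx, dy) from (x, y)
-- into four boolean flags (the loop body of Source B), …
def pvStepB (x : Int) (y : Int) (f : Bool × Bool × Bool × Bool) (r : Int × Int) :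
    Bool × Bool × Bool × Bool :=
  let dx := r.1 - x
  let dy := r.2 - y
  if dx == 1 && dy == 0 then (true, f.2.1, f.2.2.1, f.2.2.2)
  else if dx == -1 && dy == 0 then (f.1, true, f.2.2.1, f.2.2.2)
  else if dx == 0 && dy == 1 then (f.1, f.2.1, true, f.2.2.2)
  else if dx == 0 && dy == -1 then (f.1, f.2.1, f.2.2.1, true)
  else f

-- … then the set comprehension over the four (direction, flag) pairs.
def get_connected_directions_py_alt (x : Int) (y : Int) (room_list : List (Int × Int)) : List String :=
  let f := room_list.foldl (pvStepB x y) (false, false, false, false)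
  (if f.1 then ["E"] else []) ++ (if f.2.1 then ["W"] else []) ++
  (if f.2.2.1 then ["N"] else []) ++ (if f.2.2.2 then ["S"] else [])

-- ===== PRECONDITION & SPEC =====
def Spec_get_connected_directions_py (x : Int) (y : Int) (room_list : List (Int × Int)) (out : List String) : Prop := out = get_connected_directions_py_alt x y room_list
instance (x : Int) (y : Int) (room_list : List (Int × Int)) (out : List String) : Decidable (Spec_get_connected_directions_py x y room_list out) := by unfold Spec_get_connected_directions_py; infer_instance

-- ===== CLAIM (what is proved, stated in full; the proofs are below) =====
def Claim_equal_get_connected_directions_py : Prop := ∀ (x : Int) (y : Int) (room_list : List (Int × Int)), Dom_get_connected_directions_py x y room_list → Spec_get_connected_directions_py x y room_list (get_connected_directions_py x y room_list)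

-- ===== LEMMAS AND PROOFS =====
-- B's flag fold computes exactly the four membership tests that A performs.
theorem pvFoldB_spec (x y : Int) (rl : List (Int × Int)) (f : Bool × Bool × Bool × Bool) :
    rl.foldl (pvStepB x y) f =
      (f.1 || rl.contains (x + 1, y), f.2.1 || rl.contains (x - 1, y),
       f.2.2.1 || rl.contains (x, y + 1), f.2.2.2 || rl.contains (x, y - 1)) := by
  induction rl generalizing f with
  | nil => simp
  | cons r rs ih =>
    obtain ⟨rx, ry⟩ := r
    simp only [List.foldl_cons, ih, List.contains_cons]
    unfold pvStepB
    have h1 : ((rx - x == (1 : Int)) && (ry - y == (0 : Int)))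
        = (((x + 1, y) : Int × Int) == (rx, ry)) := by
      rw [Bool.eq_iff_iff]; simp only [Bool.and_eq_true, beq_iff_eq, Prod.mk.injEq]; omega
    have h2 : ((rx - x == (-1 : Int)) && (ry - y == (0 : Int)))
        = (((x - 1, y) : Int × Int) == (rx, ry)) := by
      rw [Bool.eq_iff_iff]; simp only [Bool.and_eq_true, beq_iff_eq, Prod.mk.injEq]; omega
    have h3 : ((rx - x == (0 : Int)) && (ry - y == (1 : Int)))
        = (((x, y + 1) : Int × Int) == (rx, ry)) := by
      rw [Bool.eq_iff_iff]; simp only [Bool.and_eq_true, beq_iff_eq, Prod.mk.injEq]; omega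
    have h4 : ((rx - x == (0 : Int)) && (ry - y == (-1 : Int)))
        = (((x, y - 1) : Int × Int) == (rx, ry)) := by
      rw [Bool.eq_iff_iff]; simp only [Bool.and_eq_true, beq_iff_eq, Prod.mk.injEq]; omega
    simp only [h1, h2, h3, h4]
    rcases eq_or_ne (((x + 1, y)) : Int × Int) (rx, ry) with e1 | e1
    · have hx : x + 1 = rx ∧ y = ry := by simpa [Prod.mk.injEq] using e1
      have e2 : (((x - 1, y)) : Int × Int) ≠ (rx, ry) := by simp [Prod.mk.injEq]; omega
      have e3 : (((x, y + 1)) : Int × Int) ≠ (rx, ry) := by simp [Prod.mk.injEq]; intro _; omega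
      have e4 : (((x, y - 1)) : Int × Int) ≠ (rx, ry) := by simp [Prod.mk.injEq]; intro _; omega
      simp [e1, beq_eq_false_iff_ne.mpr e2, beq_eq_false_iff_ne.mpr e3, beq_eq_false_iff_ne.mpr e4]
    · rcases eq_or_ne (((x - 1, y)) : Int × Int) (rx, ry) with e2 | e2
      · have hx : x - 1 = rx ∧ y = ry := by simpa [Prod.mk.injEq] using e2
        have e3 : (((x, y + 1)) : Int × Int) ≠ (rx, ry) := by simp [Prod.mk.injEq]; intro _; omega
        have e4 : (((x, y - 1)) : Int × Int) ≠ (rx, ry) := by simp [Prod.mk.injEq]; intro _; omega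
        simp [beq_eq_false_iff_ne.mpr e1, e2, beq_eq_false_iff_ne.mpr e3, beq_eq_false_iff_ne.mpr e4]
      · rcases eq_or_ne (((x, y + 1)) : Int × Int) (rx, ry) with e3 | e3
        · have hx : x = rx ∧ y + 1 = ry := by simpa [Prod.mk.injEq] using e3
          have e4 : (((x, y - 1)) : Int × Int) ≠ (rx, ry) := by simp [Prod.mk.injEq]; intro _; omega
          simp [beq_eq_false_iff_ne.mpr e1, beq_eq_false_iff_ne.mpr e2, e3, beq_eq_false_iff_ne.mpr e4]
        · rcases eq_or_ne (((x, y - 1)) : Int × Int) (rx, ry) with e4 | e4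
          · simp [beq_eq_false_iff_ne.mpr e1, beq_eq_false_iff_ne.mpr e2, beq_eq_false_iff_ne.mpr e3, e4]
          · simp [beq_eq_false_iff_ne.mpr e1, beq_eq_false_iff_ne.mpr e2, beq_eq_false_iff_ne.mpr e3, beq_eq_false_iff_ne.mpr e4]

-- ===== VERDICT (by name: the statement is the Claim_ definition above) =====
theorem get_connected_directions_py_spec : Claim_equal_get_connected_directions_py := by
  intro x y rl _
  unfold Spec_get_connected_directions_py get_connected_directions_py get_connected_directions_py_alt
  rw [pvFoldB_spec]
  simp only [List.foldl_cons, List.foldl_nil, Bool.false_or]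
  by_cases hE : (x + 1, y) ∈ rl <;>
  by_cases hW : (x - 1, y) ∈ rl <;>
  by_cases hN : (x, y + 1) ∈ rl <;>
  by_cases hS : (x, y - 1) ∈ rl <;>
    simp [hE, hW, hN, hS, PySem.Set.add, PySem.Set.empty, PySem.Set.contains]
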